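-- pv_equiv track=rewrite | github.com/eichelb4rt/adventofcode_2023 | day_12/part_2.py | find_islands
-- ===== SOURCE A (Python) =====
-- def find_islands(spring_line: list[str]) -> list[list[str]]:
--     """Separates spring line into islands composed of '?' and '#'."""
--
--     islands = []
--     last_island_start = 0
--     on_island = False
--     for i, spring in enumerate(spring_line):
--         # if we were on an island and reached the sea, save the island
--         if on_island and spring == ".":
--             islands.append(spring_line[last_island_start: i])
--             on_island = False
--         # if we were in the sea and step on an island, remember where it started
--         elif not on_island and spring in ["#", "?"]:
--             last_island_start = i
--             on_island = True
--     # save the last island if we didn't already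
--     if on_island:
--         islands.append(spring_line[last_island_start:])
--     return islands
-- ===== SOURCE B (Python) =====
-- def find_islands(spring_line: list[str]) -> list[list[str]]:
--     """Separates spring line into islands composed of '?' and '#'.
--
--     Two-pointer scan: whenever the cursor stands on a '#' or '?', the island
--     extends from there up to the next '.', so skip ahead to it and slice.
--     """
--     islands = []
--     n = len(spring_line)
--     i = 0
--     while i < n:
--         if spring_line[i] in ("#", "?"):
--             start = i
--             while i < n and spring_line[i] != ".":
--                 i += 1
--             islands.append(spring_line[start:i])
--         else:
--             i += 1
--     return islands
-- ===== Notes on version B (the rewrite author's own statement) =====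
-- stated objective: alternative
-- what changed: Replaces A's single stateful pass (on_island flag plus remembered start index, deciding per element) with a two-pointer scan: on reaching a '#'/'?' an inner loop jumps the cursor ahead to the next '.' and the island is sliced out in one step; no boolean state is carried.
import Mathlib
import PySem

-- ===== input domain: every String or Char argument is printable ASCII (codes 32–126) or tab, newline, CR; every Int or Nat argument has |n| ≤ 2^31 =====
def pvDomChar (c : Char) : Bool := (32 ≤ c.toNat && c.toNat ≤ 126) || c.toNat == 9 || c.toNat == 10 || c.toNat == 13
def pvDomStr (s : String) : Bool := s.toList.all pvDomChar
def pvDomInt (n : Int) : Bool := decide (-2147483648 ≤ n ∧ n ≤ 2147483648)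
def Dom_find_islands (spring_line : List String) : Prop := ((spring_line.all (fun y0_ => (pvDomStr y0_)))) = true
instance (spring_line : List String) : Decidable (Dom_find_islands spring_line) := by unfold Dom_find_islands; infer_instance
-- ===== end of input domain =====

-- B replaces A's stateful one-pass scan (on_island flag + remembered start index) with a
-- two-pointer scan: at each '#'/'?' an inner loop jumps to the next '.' and slices the island
-- out in one step (objective: alternative decomposition, same cost).

-- ===== PORT A =====
-- the for-loop of A as structural recursion over the same state (islands, last_island_start, on_island)
def find_islands_go (spring_line : List String) :
    Int → List String → List (List String) × Int × Bool → List (List String) × Int × Bool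
  | _, [], st => st
  | i, spring :: rest, (islands, last, on) =>
      find_islands_go spring_line (i + 1) rest
        (if on && spring == "." then
          (islands ++ [PySem.List.slice spring_line (some last) (some i)], last, false)
        else if !on && (spring == "#" || spring == "?") then
          (islands, i, true)
        else (islands, last, on))

-- the final 'if on_island: islands.append(spring_line[last_island_start:])'
def find_islands_finish (spring_line : List String)
    (st : List (List String) × Int × Bool) : List (List String) :=
  if st.2.2 then st.1 ++ [PySem.List.slice spring_line (some st.2.1) none] else st.1

def find_islands (spring_line : List String) : List (List String) :=
  find_islands_finish spring_line (find_islands_go spring_line 0 spring_line ([], 0, false))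

-- ===== PORT B =====
-- Source B's inner 'while i < n and spring_line[i] != ".": i += 1' (returns the final cursor)
def find_islands_alt_inner (spring_line : List String) (i : Nat) : Nat :=
  if h : i < spring_line.length ∧ spring_line[i]? ≠ some "." then
    find_islands_alt_inner spring_line (i + 1)
  else i
termination_by spring_line.length - i
decreasing_by omega

-- the inner while only moves the cursor forward (used for the outer loop's termination)
theorem find_islands_alt_inner_ge (spring_line : List String) (i : Nat) :
    i ≤ find_islands_alt_inner spring_line i := by
  rw [find_islands_alt_inner]
  split
  next h => exact le_trans (Nat.le_succ i) (find_islands_alt_inner_ge spring_line (i + 1))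
  next => exact le_rfl
termination_by spring_line.length - i
decreasing_by omega

theorem find_islands_alt_inner_gt (spring_line : List String) (i : Nat)
    (hi : i < spring_line.length) (hne : spring_line[i]? ≠ some ".") :
    i < find_islands_alt_inner spring_line i := by
  rw [find_islands_alt_inner, dif_pos ⟨hi, hne⟩]
  exact lt_of_lt_of_le (Nat.lt_succ_self i) (find_islands_alt_inner_ge spring_line (i + 1))

-- Source B's outer while loop with cursor i and accumulator islands
def find_islands_alt_go (spring_line : List String) (i : Nat)
    (islands : List (List String)) : List (List String) :=
  if hi : i < spring_line.length then
    if hq : spring_line[i]? = some "#" ∨ spring_line[i]? = some "?" then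
      find_islands_alt_go spring_line (find_islands_alt_inner spring_line i)
        (islands ++ [PySem.List.slice spring_line (some (i : Int))
          (some ((find_islands_alt_inner spring_line i : Nat) : Int))])
    else
      find_islands_alt_go spring_line (i + 1) islands
  else islands
termination_by spring_line.length - i
decreasing_by
  · have : i < find_islands_alt_inner spring_line i := by
      apply find_islands_alt_inner_gt spring_line i hi
      rcases hq with h | h <;> simp [h]
    omega
  · omega

def find_islands_alt (spring_line : List String) : List (List String) :=
  find_islands_alt_go spring_line 0 []

-- ===== PRECONDITION & SPEC =====
def Spec_find_islands (spring_line : List String) (out : List (List String)) : Prop := out = find_islands_alt spring_line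
instance (spring_line : List String) (out : List (List String)) : Decidable (Spec_find_islands spring_line out) := by unfold Spec_find_islands; infer_instance

-- ===== CLAIM (what is proved, stated in full; the proofs are below) =====
def Claim_equal_find_islands : Prop := ∀ (spring_line : List String), Dom_find_islands spring_line → Spec_find_islands spring_line (find_islands spring_line)

-- ===== LEMMAS AND PROOFS =====

-- reference characterisation of the result: islands start at a '#'/'?' and run to the next '.'
def islSpec : List String → List (List String)
  | [] => []
  | s :: rest =>
      if s == "#" || s == "?" then
        (s :: rest.takeWhile (· != ".")) :: islSpec (rest.dropWhile (· != "."))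
      else islSpec rest
termination_by l => l.length
decreasing_by
  · exact Nat.lt_succ_of_le (List.length_dropWhile_le _ _)
  · simp

theorem find_islands_go_inv (rest : List String) :
    (∀ (pre : List String) (islands : List (List String)) (last : Int),
      find_islands_finish (pre ++ rest)
        (find_islands_go (pre ++ rest) (pre.length : Int) rest (islands, last, false))
      = islands ++ islSpec rest)
    ∧ (∀ (pre : List String) (islands : List (List String)) (lastN : Nat), lastN ≤ pre.length →
      find_islands_finish (pre ++ rest)
        (find_islands_go (pre ++ rest) (pre.length : Int) rest (islands, (lastN : Int), true))
      = islands ++ (pre.drop lastN ++ rest.takeWhile (· != ".")) :: islSpec (rest.dropWhile (· != "."))) := by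
  induction rest with
  | nil =>
      constructor
      · intro pre islands last
        simp [find_islands_go, find_islands_finish, islSpec]
      · intro pre islands lastN h
        simp [find_islands_go, find_islands_finish, PySem.List.slice_from_natCast, islSpec]
  | cons s rest ih =>
      constructor
      · intro pre islands last
        by_cases hs : s = "#" ∨ s = "?"
        · have hne : (s == "#" || s == "?") = true := by
            rcases hs with h | h <;> simp [h]
          have step : find_islands_go (pre ++ s :: rest) ((pre.length : Int)) (s :: rest)
              (islands, last, false)
              = find_islands_go ((pre ++ [s]) ++ rest) (((pre ++ [s]).length : Int)) rest
                (islands, (pre.length : Int), true) := by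
            simp [find_islands_go, hne]
          rw [show pre ++ s :: rest = (pre ++ [s]) ++ rest by simp]  at step ⊢
          rw [step]
          have := (ih.2) (pre ++ [s]) islands pre.length (by simp)
          rw [this]
          have hdrop : (pre ++ [s]).drop pre.length = [s] := by
            simp
          rw [hdrop]
          simp [islSpec, hne]
        · have hne : (s == "#" || s == "?") = false := by
            rw [not_or] at hs
            simp [hs.1, hs.2]
          have step : find_islands_go (pre ++ s :: rest) ((pre.length : Int)) (s :: rest)
              (islands, last, false)
              = find_islands_go ((pre ++ [s]) ++ rest) (((pre ++ [s]).length : Int)) rest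
                (islands, last, false) := by
            simp [find_islands_go, hne]
          rw [show pre ++ s :: rest = (pre ++ [s]) ++ rest by simp] at step ⊢
          rw [step, (ih.1) (pre ++ [s]) islands last]
          have : islSpec (s :: rest) = islSpec rest := by
            simp [islSpec, hne]
          rw [this]
      · intro pre islands lastN h
        by_cases hsd : s = "."
        · subst hsd
          have hslice : PySem.List.slice (pre ++ "." :: rest) (some (lastN : Int)) (some (pre.length : Int))
              = pre.drop lastN := by
            rw [PySem.List.slice_natCast]
            rw [List.drop_append_of_le_length h]
            rw [List.take_left' (by simp [List.length_drop])]
          have step : find_islands_go (pre ++ "." :: rest) ((pre.length : Int)) ("." :: rest)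
              (islands, (lastN : Int), true)
              = find_islands_go ((pre ++ ["."]) ++ rest) (((pre ++ ["."]).length : Int)) rest
                (islands ++ [pre.drop lastN], (lastN : Int), false) := by
            simp [find_islands_go, hslice]
          rw [show pre ++ "." :: rest = (pre ++ ["."]) ++ rest by simp] at step ⊢
          rw [step, (ih.1) (pre ++ ["."]) (islands ++ [pre.drop lastN]) (lastN : Int)]
          have : islSpec ("." :: rest) = islSpec rest := by simp [islSpec]
          simp [List.takeWhile, List.dropWhile, this]
        · have hne : (s == ".") = false := by simp [hsd]
          have step : find_islands_go (pre ++ s :: rest) ((pre.length : Int)) (s :: rest)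
              (islands, (lastN : Int), true)
              = find_islands_go ((pre ++ [s]) ++ rest) (((pre ++ [s]).length : Int)) rest
                (islands, (lastN : Int), true) := by
            simp [find_islands_go, hne]
          have hb : (s != ".") = true := by simp [hsd]
          rw [show pre ++ s :: rest = (pre ++ [s]) ++ rest by simp] at step ⊢
          rw [step, (ih.2) (pre ++ [s]) islands lastN (by simp; omega)]
          rw [List.drop_append_of_le_length h]
          simp [List.takeWhile, List.dropWhile, hb]

theorem find_islands_eq_spec (l : List String) : find_islands l = islSpec l := by
  have := (find_islands_go_inv l).1 [] [] 0
  simpa [find_islands] using this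

-- the inner while stops exactly after the '.'-free stretch starting at the cursor
theorem find_islands_alt_inner_spec_aux (l : List String) :
    ∀ (n i : Nat), l.length - i ≤ n →
      find_islands_alt_inner l i = i + ((l.drop i).takeWhile (· != ".")).length := by
  intro n
  induction n with
  | zero =>
      intro i hn
      have hge : l.length ≤ i := by omega
      rw [find_islands_alt_inner, dif_neg (by omega), List.drop_eq_nil_of_le hge]
      simp
  | succ n ih =>
      intro i hn
      rw [find_islands_alt_inner]
      split
      next h =>
        obtain ⟨hi, hne⟩ := h
        have hdrop : l.drop i = l[i] :: l.drop (i + 1) := List.drop_eq_getElem_cons hi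
        have hs : l[i] ≠ "." := by
          intro hc; exact hne (by rw [List.getElem?_eq_getElem hi, hc])
        have hb : (l[i] != ".") = true := by simp [hs]
        rw [ih (i + 1) (by omega), hdrop]
        simp [List.takeWhile, hb]
        omega
      next h =>
        by_cases hi : i < l.length
        · have hdot : l[i]? = some "." := by
            by_contra hc
            exact h ⟨hi, hc⟩
          have hdrop : l.drop i = l[i] :: l.drop (i + 1) := List.drop_eq_getElem_cons hi
          have hs : l[i] = "." := by
            have := List.getElem?_eq_getElem hi
            rw [this] at hdot
            exact Option.some.inj hdot
          rw [hdrop]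
          simp [List.takeWhile, hs]
        · rw [List.drop_eq_nil_of_le (by omega)]
          simp

theorem find_islands_alt_inner_spec (l : List String) (i : Nat) :
    find_islands_alt_inner l i = i + ((l.drop i).takeWhile (· != ".")).length :=
  find_islands_alt_inner_spec_aux l (l.length - i) i le_rfl

theorem find_islands_alt_go_spec_aux (l : List String) :
    ∀ (n i : Nat) (islands : List (List String)), l.length - i ≤ n →
      find_islands_alt_go l i islands = islands ++ islSpec (l.drop i) := by
  intro n
  induction n with
  | zero =>
      intro i islands hn
      rw [find_islands_alt_go, dif_neg (by omega), List.drop_eq_nil_of_le (by omega)]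
      simp [islSpec]
  | succ n ih =>
      intro i islands hn
      rw [find_islands_alt_go]
      split
      next hi =>
        have hdrop : l.drop i = l[i] :: l.drop (i + 1) := List.drop_eq_getElem_cons hi
        split
        next hq =>
          have hget : l[i]? = some l[i] := List.getElem?_eq_getElem hi
          have hsq : l[i] = "#" ∨ l[i] = "?" := by
            rcases hq with h | h <;> rw [hget] at h <;>
              [left; right] <;> exact Option.some.inj h
          have hne : l[i] ≠ "." := by rcases hsq with h | h <;> simp [h]
          have hbq : (l[i] == "#" || l[i] == "?") = true := by
            rcases hsq with h | h <;> simp [h]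
          have hb : (l[i] != ".") = true := by simp [hne]
          have hj := find_islands_alt_inner_spec l i
          set k := ((l.drop i).takeWhile (· != ".")).length with hk
          have hk1 : 1 ≤ k := by
            rw [hk, hdrop]
            simp [List.takeWhile, hb]
          -- the slice [i:j] is exactly the '.'-free stretch
          have htake : (l.drop i).takeWhile (· != ".") = (l.drop i).take k := by
            rw [hk]
            exact List.prefix_iff_eq_take.mp (List.takeWhile_prefix _)
          have hslice : PySem.List.slice l (some (i : Int))
              (some ((find_islands_alt_inner l i : Nat) : Int)) = (l.drop i).takeWhile (· != ".") := by
            rw [PySem.List.slice_natCast, hj, htake]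
            congr 1
            omega
          -- the cursor lands on the dropWhile suffix
          have hdropj : l.drop (find_islands_alt_inner l i) = (l.drop i).dropWhile (· != ".") := by
            rw [hj, ← List.drop_drop]
            conv_lhs => rw [show l.drop i
              = (l.drop i).takeWhile (· != ".") ++ (l.drop i).dropWhile (· != ".") from
                (List.takeWhile_append_dropWhile ..).symm]
            exact List.drop_left' hk.symm
          rw [ih (find_islands_alt_inner l i) _ (by omega), hslice, hdropj]
          have : islSpec (l.drop i)
              = ((l[i] :: (l.drop (i + 1)).takeWhile (· != ".")))
                :: islSpec ((l.drop (i + 1)).dropWhile (· != ".")) := by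
            rw [hdrop, islSpec, if_pos hbq]
          rw [this]
          rw [hdrop]
          simp [List.takeWhile, List.dropWhile, hb]
        next hq =>
          have hget : l[i]? = some l[i] := List.getElem?_eq_getElem hi
          have hbq : (l[i] == "#" || l[i] == "?") = false := by
            rw [not_or] at hq
            have h1 : l[i] ≠ "#" := fun hc => hq.1 (by rw [hget, hc])
            have h2 : l[i] ≠ "?" := fun hc => hq.2 (by rw [hget, hc])
            simp [h1, h2]
          rw [ih (i + 1) islands (by omega)]
          rw [hdrop, islSpec, if_neg (by simp [hbq] : ¬ (l[i] == "#" || l[i] == "?") = true)]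
      next hi =>
        rw [List.drop_eq_nil_of_le (by omega)]
        simp [islSpec]

theorem find_islands_alt_go_spec (l : List String) (i : Nat) (islands : List (List String)) :
    find_islands_alt_go l i islands = islands ++ islSpec (l.drop i) :=
  find_islands_alt_go_spec_aux l (l.length - i) i islands le_rfl

theorem find_islands_alt_eq_spec (l : List String) : find_islands_alt l = islSpec l := by
  have := find_islands_alt_go_spec l 0 []
  simpa [find_islands_alt] using this

-- ===== VERDICT (by name: the statement is the Claim_ definition above) =====
theorem find_islands_spec : Claim_equal_find_islands := by
  intro spring_line _
  unfold Spec_find_islands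
  rw [find_islands_eq_spec, find_islands_alt_eq_spec]
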